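-- pv_equiv track=rewrite | github.com/garywu2/SEC2019 | dash_helper.py | duplicate_filename_check
-- ===== SOURCE A (Python) =====
-- def duplicate_filename_check(filenames):
--     seen = set()
--     for filename in filenames:
--         filename = filename[0:31]
--         if filename in seen:
--             return True
--         seen.add(filename)
--     return False
-- ===== SOURCE B (Python) =====
-- def duplicate_filename_check(filenames):
--     trunc = [f[0:31] for f in filenames]
--     return len(set(trunc)) != len(trunc)
-- ===== Notes on version B (the rewrite author's own statement) =====
-- stated objective: idiomatic
-- what changed: Replaces the incremental early-exit seen-set loop with materializing all truncated names once and comparing the deduplicated cardinality to the list length.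
import Mathlib
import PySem

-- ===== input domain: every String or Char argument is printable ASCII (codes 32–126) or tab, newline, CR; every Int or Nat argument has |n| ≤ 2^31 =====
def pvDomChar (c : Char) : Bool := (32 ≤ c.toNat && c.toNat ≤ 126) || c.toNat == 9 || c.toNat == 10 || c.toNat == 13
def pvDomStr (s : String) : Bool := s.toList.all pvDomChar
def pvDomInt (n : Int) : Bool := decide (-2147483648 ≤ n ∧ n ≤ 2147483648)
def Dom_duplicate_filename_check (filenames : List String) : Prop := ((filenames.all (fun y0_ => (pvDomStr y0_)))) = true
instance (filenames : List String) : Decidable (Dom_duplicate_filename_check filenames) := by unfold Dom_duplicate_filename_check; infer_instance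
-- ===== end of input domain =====

-- ===== PORT A =====
-- A: early-exit loop maintaining a running seen-set of truncated names.
def dupCheckGo (rest : List String) (seen : PySem.Set String) : Bool :=
  match rest with
  | [] => false
  | f :: rest' =>
    let t := PySem.Str.slice f (some 0) (some 31)
    if PySem.Set.contains seen t then true
    else dupCheckGo rest' (PySem.Set.add seen t)

def duplicate_filename_check (filenames : List String) : Bool :=
  dupCheckGo filenames PySem.Set.empty

-- ===== PORT B =====
-- B: materialize all truncated names, then a cardinality comparison.
def duplicate_filename_check_alt (filenames : List String) : Bool :=
  let trunc := filenames.map (fun f => PySem.Str.slice f (some 0) (some 31))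
  decide ((PySem.Set.ofList trunc).length ≠ trunc.length)

-- ===== PRECONDITION & SPEC =====
def Spec_duplicate_filename_check (filenames : List String) (out : Bool) : Prop := out = duplicate_filename_check_alt filenames
instance (filenames : List String) (out : Bool) : Decidable (Spec_duplicate_filename_check filenames out) := by unfold Spec_duplicate_filename_check; infer_instance

-- ===== CLAIM (what is proved, stated in full; the proofs are below) =====
def Claim_equal_duplicate_filename_check : Prop := ∀ (filenames : List String), Dom_duplicate_filename_check filenames → Spec_duplicate_filename_check filenames (duplicate_filename_check filenames)

-- ===== LEMMAS AND PROOFS =====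

-- ===== VERDICT (by name: the statement is the Claim_ definition above) =====
-- A's loop returns true iff the seen-set extended by the remaining truncated names has a repeat.
theorem dupCheckGo_eq (xs : List String) (seen : List String) (h : seen.Nodup) :
    dupCheckGo xs seen
      = !decide ((seen ++ xs.map (fun f => PySem.Str.slice f (some 0) (some 31))).Nodup) := by
  induction xs generalizing seen with
  | nil => simp [dupCheckGo, h]
  | cons f rest ih =>
    simp only [dupCheckGo, List.map_cons]
    by_cases hm : PySem.Str.slice f (some 0) (some 31) ∈ seen
    · rw [if_pos (by simpa [PySem.Set.contains_iff] using hm)]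
      have : ¬ (seen ++ PySem.Str.slice f (some 0) (some 31)
          :: rest.map (fun f => PySem.Str.slice f (some 0) (some 31))).Nodup := by
        intro hn
        exact (List.disjoint_of_nodup_append hn) hm (by simp)
      simp [this]
    · rw [if_neg (by simpa [PySem.Set.contains_iff] using hm)]
      rw [PySem.Set.add_of_not_mem hm]
      rw [ih _ (h.append (List.nodup_singleton _)
        (by intro a ha hb; simp at hb; exact hm (hb ▸ ha)))]
      simp

theorem length_ofList_eq_iff {α : Type} [BEq α] [LawfulBEq α] (xs : List α) :
    (PySem.Set.ofList xs).length = xs.length ↔ xs.Nodup := by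
  constructor
  · intro hlen
    have hsub : List.Subperm (PySem.Set.ofList xs) xs :=
      (PySem.Set.nodup_ofList xs).subperm (fun x hx => (PySem.Set.mem_ofList xs x).1 hx)
    have hperm : List.Perm (PySem.Set.ofList xs) xs := hsub.perm_of_length_le (le_of_eq hlen.symm)
    exact hperm.nodup_iff.1 (PySem.Set.nodup_ofList xs)
  · intro hn
    rw [PySem.Set.ofList_eq_self_of_nodup xs hn]

theorem duplicate_filename_check_spec : Claim_equal_duplicate_filename_check := by
  intro filenames _
  unfold Spec_duplicate_filename_check duplicate_filename_check duplicate_filename_check_alt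
  rw [dupCheckGo_eq filenames PySem.Set.empty (by simp [PySem.Set.empty])]
  have h := length_ofList_eq_iff (filenames.map (fun f => PySem.Str.slice f (some 0) (some 31)))
  simp only [List.length_map] at h
  simp [← h]
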